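-- pv_equiv track=rewrite | github.com/marekkoc/biblioteka-kodow-git | ksiazki/python-zbior-zadan/rozwiazania/143/143.py | dwie_podobne
-- ===== SOURCE A (Python) =====
-- def dwie_podobne(f1: list, f2: list):
--   """
--   Sprawdza, czy listy znaków f1 i f2 są podobne, ale nie identyczne
--
--   """
--   if (f1 == f2): return False  # identyczne!
--   if (len(f1) != len(f2)): return False  # nie mogą być podobne w podanym sensie
--   f1c = f1.copy()
--   f2c = f2.copy()
--   for znak in f1c:
--     if znak in f2c:
--       f2c.remove(znak)
--   return not len(f2c)  # pusty f2c oznacza podobieństwo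
-- ===== SOURCE B (Python) =====
-- def dwie_podobne(f1: list, f2: list):
--   """
--   Sprawdza, czy listy znaków f1 i f2 są podobne, ale nie identyczne
--   """
--   if f1 == f2: return False
--   if len(f1) != len(f2): return False
--   return sorted(f1) == sorted(f2)
-- ===== Notes on version B (the rewrite author's own statement) =====
-- stated objective: faster
-- what changed: Replaces the copy-and-remove inner scan (membership test plus list.remove per element) with one sort of each list and a single comparison.
import Mathlib
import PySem

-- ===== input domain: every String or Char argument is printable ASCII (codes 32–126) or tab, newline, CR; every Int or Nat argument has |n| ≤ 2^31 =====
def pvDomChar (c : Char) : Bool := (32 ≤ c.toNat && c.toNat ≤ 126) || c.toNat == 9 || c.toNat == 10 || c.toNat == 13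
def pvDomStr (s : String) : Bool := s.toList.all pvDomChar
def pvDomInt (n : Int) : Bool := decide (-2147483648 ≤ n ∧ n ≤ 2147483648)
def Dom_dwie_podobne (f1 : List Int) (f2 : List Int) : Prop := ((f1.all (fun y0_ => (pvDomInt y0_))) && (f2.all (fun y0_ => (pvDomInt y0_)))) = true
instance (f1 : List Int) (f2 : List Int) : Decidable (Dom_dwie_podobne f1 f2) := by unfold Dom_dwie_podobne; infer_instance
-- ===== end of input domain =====

-- B replaces A's quadratic copy-and-remove loop by sorting both lists once and comparing (faster).

-- ===== PORT A =====
-- for znak in f1c: if znak in f2c: f2c.remove(znak)   — one loop step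
def dwie_podobne_step (acc : List Int) (znak : Int) : List Int :=
  if znak ∈ acc then
    match PySem.List.remove? acc znak with
    | some r => r
    | none => acc
  else acc

def dwie_podobne (f1 : List Int) (f2 : List Int) : Bool :=
  if f1 == f2 then false
  else if f1.length != f2.length then false
  else
    let f2c := f1.foldl dwie_podobne_step f2
    -- not len(f2c)
    f2c.length == 0

-- ===== PORT B =====
def dwie_podobne_alt (f1 : List Int) (f2 : List Int) : Bool :=
  if f1 == f2 then false
  else if f1.length != f2.length then false
  else PySem.List.sorted f1 (fun x => x) false == PySem.List.sorted f2 (fun x => x) false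

-- ===== PRECONDITION & SPEC =====
def Spec_dwie_podobne (f1 : List Int) (f2 : List Int) (out : Bool) : Prop := out = dwie_podobne_alt f1 f2
instance (f1 : List Int) (f2 : List Int) (out : Bool) : Decidable (Spec_dwie_podobne f1 f2 out) := by unfold Spec_dwie_podobne; infer_instance

-- ===== CLAIM (what is proved, stated in full; the proofs are below) =====
def Claim_equal_dwie_podobne : Prop := ∀ (f1 : List Int) (f2 : List Int), Dom_dwie_podobne f1 f2 → Spec_dwie_podobne f1 f2 (dwie_podobne f1 f2)

-- ===== LEMMAS AND PROOFS =====

-- the loop step is exactly List.erase (remove the first occurrence, if any)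
theorem dwie_podobne_step_eq_erase (acc : List Int) (z : Int) :
    dwie_podobne_step acc z = acc.erase z := by
  unfold dwie_podobne_step
  by_cases h : z ∈ acc
  · simp [h, PySem.List.remove?_eq_some_erase acc z h]
  · simp [h, List.erase_of_not_mem h]

-- the whole loop computes f2.diff f1
theorem foldl_step_eq_diff (f1 f2 : List Int) :
    f1.foldl dwie_podobne_step f2 = f2.diff f1 := by
  induction f1 generalizing f2 with
  | nil => simp [List.diff]
  | cons z t ih =>
      simp [List.foldl_cons, dwie_podobne_step_eq_erase, ih, List.diff_cons]

-- with equal lengths, the loop leaves f2c empty iff the lists are permutations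
theorem diff_nil_iff_perm (f1 f2 : List Int) (h : f1.length = f2.length) :
    f2.diff f1 = [] ↔ f1.Perm f2 := by
  constructor
  · intro hd
    have hsub : (f2 : Multiset Int) - (f1 : Multiset Int) = 0 := by
      rw [Multiset.coe_sub, hd]; rfl
    have hle : (f2 : Multiset Int) ≤ (f1 : Multiset Int) := tsub_eq_zero_iff_le.mp hsub
    have hcard : Multiset.card (f1 : Multiset Int) ≤ Multiset.card (f2 : Multiset Int) := by
      simpa [Multiset.coe_card] using h.le
    have := Multiset.eq_of_le_of_card_le hle hcard
    exact Multiset.coe_eq_coe.mp this.symm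
  · intro hp
    have : (f2 : Multiset Int) - (f1 : Multiset Int) = 0 := by
      rw [Multiset.coe_eq_coe.mpr hp.symm]; simp
    rw [Multiset.coe_sub] at this
    exact Multiset.coe_eq_coe.mp this |>.eq_nil

-- ===== VERDICT (by name: the statement is the Claim_ definition above) =====
theorem dwie_podobne_spec : Claim_equal_dwie_podobne := by
  intro f1 f2 _
  unfold Spec_dwie_podobne dwie_podobne dwie_podobne_alt
  by_cases heq : f1 = f2
  · simp [heq]
  · simp only [beq_iff_eq, heq, if_false]
    by_cases hlen : f1.length = f2.length
    · simp only [hlen, bne_self_eq_false]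
      rw [foldl_step_eq_diff]
      have hperm := diff_nil_iff_perm f1 f2 hlen
      by_cases hp : f1.Perm f2
      · simp [hperm.mpr hp, (PySem.List.sorted_id_eq_sorted_id_iff_perm f1 f2).mpr hp]
      · have hd : f2.diff f1 ≠ [] := fun h => hp (hperm.mp h)
        have : (PySem.List.sorted f1 (fun x => x) false == PySem.List.sorted f2 (fun x => x) false) = false := by
          simp [PySem.List.sorted_id_eq_sorted_id_iff_perm f1 f2, hp]
        rw [this]
        simp [List.length_eq_zero_iff, hd]
    · simp [bne_iff_ne, hlen]
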